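-- pv_equiv track=rewrite | github.com/arturo-jc/lewis-bot | extract.py | get_longest_tweet
-- ===== SOURCE A (Python) =====
-- def get_longest_tweet(index_start, sentence_list):
--     tweet = None
--     cutoff = len(sentence_list)
--     while cutoff > index_start:
--         segment = ". ".join(sentence_list[index_start:cutoff])
--         if len(segment) > 280:
--             cutoff = cutoff - 1
--         else:
--             tweet = segment
--             break
--     return tweet
-- ===== SOURCE B (Python) =====
-- def get_longest_tweet(index_start, sentence_list):
--     # Single forward pass over cumulative joined length; join once at the end.
--     tail = sentence_list[index_start:]
--     best = None
--     total = 0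
--     for k, sentence in enumerate(tail, 1):
--         total += len(sentence) + (2 if k > 1 else 0)
--         if total > 280:
--             break
--         best = k
--     if best is None:
--         return None
--     return ". ".join(tail[:best])
-- ===== Notes on version B (the rewrite author's own statement) =====
-- stated objective: faster
-- what changed: A repeatedly joins shrinking slices from the top (re-joining up to O(n) strings per step); B slices the tail once, makes one forward pass accumulating the joined length to find the largest fitting prefix, and joins once.
-- intended difference: For negative index_start whose tail is empty or whose first sentence alone exceeds 280 characters, A's shrinking cutoff walks past the clamped start and returns the empty string '', while B returns None, the intended 'nothing fits' answer. — e.g. on get_longest_tweet(-1, []): A returns some "", B returns none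
import Mathlib
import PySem

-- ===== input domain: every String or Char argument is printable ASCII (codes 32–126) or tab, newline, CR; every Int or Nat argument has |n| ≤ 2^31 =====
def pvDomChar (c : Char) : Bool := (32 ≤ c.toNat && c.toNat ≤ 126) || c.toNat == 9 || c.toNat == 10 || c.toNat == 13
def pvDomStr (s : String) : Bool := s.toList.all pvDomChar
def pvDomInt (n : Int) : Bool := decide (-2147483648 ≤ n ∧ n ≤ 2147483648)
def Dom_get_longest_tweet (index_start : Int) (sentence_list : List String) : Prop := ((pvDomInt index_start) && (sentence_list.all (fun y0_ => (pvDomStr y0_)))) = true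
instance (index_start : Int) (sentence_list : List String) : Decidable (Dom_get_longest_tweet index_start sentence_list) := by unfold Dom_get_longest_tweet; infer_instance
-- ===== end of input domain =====

-- B replaces A's repeated join-and-shrink scan by one forward pass over the joined length
-- of the tail slice (joined once at the end); objective: faster. On negative index_start
-- with an empty tail or an oversized first sentence, A returns "" and B returns none (see D_).


-- ===== PORT A =====
-- while loop as fuel recursion; the fuel bounds the number of iterations, the guard is A's own
def getltLoopA (a : Int) (l : List String) : Nat → Int → Option String
  | 0, _ => none
  | fuel+1, cutoff =>
    if a < cutoff then
      let segment := PySem.Str.join ". " (PySem.List.slice l (some a) (some cutoff))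
      if 280 < PySem.Str.len segment then getltLoopA a l fuel (cutoff - 1)
      else some segment
    else none

def get_longest_tweet (index_start : Int) (sentence_list : List String) : Option String :=
  getltLoopA index_start sentence_list (((sentence_list.length : Int) - index_start).toNat + 1)
    (sentence_list.length : Int)

-- ===== PORT B =====
-- forward pass over the tail: best prefix count so far, running joined length, counter k
def getltLoopB : List String → Option Int → Int → Int → Option Int
  | [], best, _, _ => best
  | s :: rest, best, total, k =>
    let k' := k + 1
    let total' := total + PySem.Str.len s + (if 1 < k' then 2 else 0)
    if 280 < total' then best
    else getltLoopB rest (some k') total' k'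

def get_longest_tweet_alt (index_start : Int) (sentence_list : List String) : Option String :=
  let tail := PySem.List.slice sentence_list (some index_start) none
  match getltLoopB tail none 0 0 with
  | none => none
  | some b => some (PySem.Str.join ". " (PySem.List.slice tail none (some b)))

-- ===== PRECONDITION & SPEC =====
-- For negative index_start whose tail is empty or whose first sentence alone exceeds 280
-- characters, A returns the empty string "" (its shrinking cutoff walks past the clamped
-- start and joins an empty slice), while B returns none, the intended "nothing fits" answer.
def D_get_longest_tweet (index_start : Int) (sentence_list : List String) : Prop :=
  index_start < 0 ∧
    (sentence_list.drop ((sentence_list.length + index_start).toNat) = [] ∨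
      280 < PySem.Str.len ((sentence_list.drop ((sentence_list.length + index_start).toNat)).headD ""))
instance (index_start : Int) (sentence_list : List String) : Decidable (D_get_longest_tweet index_start sentence_list) := by unfold D_get_longest_tweet; infer_instance

def Spec_get_longest_tweet (index_start : Int) (sentence_list : List String) (out : Option String) : Prop := ¬ D_get_longest_tweet index_start sentence_list → out = get_longest_tweet_alt index_start sentence_list
instance (index_start : Int) (sentence_list : List String) (out : Option String) : Decidable (Spec_get_longest_tweet index_start sentence_list out) := by unfold Spec_get_longest_tweet; infer_instance

def pvDiffWitness_get_longest_tweet : Int × List String := (-1, [])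
def pvDiffWitnessOut_get_longest_tweet : (Option String) × (Option String) := (some "", none)

-- ===== CLAIM (what is proved, stated in full; the proofs are below) =====
def Claim_unchanged_get_longest_tweet : Prop := ∀ (index_start : Int) (sentence_list : List String), Dom_get_longest_tweet index_start sentence_list → Spec_get_longest_tweet index_start sentence_list (get_longest_tweet index_start sentence_list)
def Claim_changed_get_longest_tweet : Prop := Dom_get_longest_tweet (pvDiffWitness_get_longest_tweet.1) (pvDiffWitness_get_longest_tweet.2) ∧ D_get_longest_tweet (pvDiffWitness_get_longest_tweet.1) (pvDiffWitness_get_longest_tweet.2) ∧ get_longest_tweet (pvDiffWitness_get_longest_tweet.1) (pvDiffWitness_get_longest_tweet.2) = pvDiffWitnessOut_get_longest_tweet.1 ∧ get_longest_tweet_alt (pvDiffWitness_get_longest_tweet.1) (pvDiffWitness_get_longest_tweet.2) = pvDiffWitnessOut_get_longest_tweet.2 ∧ pvDiffWitnessOut_get_longest_tweet.1 ≠ pvDiffWitnessOut_get_longest_tweet.2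
def Claim_exact_get_longest_tweet : Prop := ∀ (index_start : Int) (sentence_list : List String), Dom_get_longest_tweet index_start sentence_list → D_get_longest_tweet index_start sentence_list → get_longest_tweet index_start sentence_list ≠ get_longest_tweet_alt index_start sentence_list

-- ===== LEMMAS AND PROOFS =====

-- joined length of a list of sentences with separator ". "
def jl (xs : List String) : Int :=
  if xs = [] then 0 else (xs.map PySem.Str.len).sum + 2 * ((xs.length : Int) - 1)

-- reference downward scan over the number k of sentences kept (z: is k = 0 admissible)
def scanK (d : List String) (z : Bool) : Nat → Option Nat
  | 0 => if z then some 0 else none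
  | k+1 => if jl (d.take (k+1)) ≤ 280 then some (k+1) else scanK d z k

lemma jl_join (xs : List String) : PySem.Str.len (PySem.Str.join ". " xs) = jl xs := by
  induction xs with
  | nil => simp [jl, PySem.Str.join, PySem.Chars.join_nil]
  | cons s t ih =>
    cases t with
    | nil =>
      simp [jl, PySem.Str.join, PySem.Chars.join_singleton]
    | cons u rest =>
      have h1 : (PySem.Str.join ". " (s :: u :: rest)).toList
          = s.toList ++ ". ".toList ++ (PySem.Str.join ". " (u :: rest)).toList := by
        rw [PySem.Str.toList_join, PySem.Str.toList_join]
        simp [PySem.Chars.join_cons_cons]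
      have hjl : jl (s :: u :: rest) = PySem.Str.len s + 2 + jl (u :: rest) := by
        simp only [jl, reduceCtorEq, if_false, List.map_cons, List.sum_cons, List.length_cons]
        push_cast
        ring
      rw [PySem.Str.len_eq, h1, hjl, ← ih, PySem.Str.len_eq, PySem.Str.len_eq]
      simp only [List.length_append]
      have h2 : (". ".toList).length = 2 := by decide
      rw [h2]
      push_cast
      ring

lemma jl_nil : jl [] = 0 := by simp [jl]

lemma jl_append_singleton (xs : List String) (y : String) :
    jl (xs ++ [y]) = jl xs + PySem.Str.len y + (if xs = [] then 0 else 2) := by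
  cases xs with
  | nil => simp [jl]
  | cons a t =>
    simp [jl, List.map_append, List.sum_append]
    push_cast
    ring

lemma len_nonneg (s : String) : 0 ≤ PySem.Str.len s := by
  rw [PySem.Str.len_eq]; positivity

lemma jl_take_succ_ge (d : List String) (k : Nat) : jl (d.take k) ≤ jl (d.take (k+1)) := by
  by_cases h : d.length ≤ k
  · rw [List.take_of_length_le h, List.take_of_length_le (by omega)]
  · push_neg at h
    have : d.take (k+1) = d.take k ++ [d[k]] := by
      rw [List.take_succ]
      simp [List.getElem?_eq_getElem h]
    rw [this, jl_append_singleton]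
    have := len_nonneg d[k]
    split_ifs <;> linarith

lemma jl_take_mono (d : List String) {j k : Nat} (h : j ≤ k) : jl (d.take j) ≤ jl (d.take k) := by
  induction k with
  | zero =>
    have hj : j = 0 := by omega
    subst hj
    exact le_rfl
  | succ k ih =>
    rcases Nat.lt_or_ge j (k+1) with h' | h'
    · exact le_trans (ih (by omega)) (jl_take_succ_ge d k)
    · have : j = k + 1 := by omega
      subst this; rfl

lemma scanK_unwind (d : List String) (z : Bool) {j K : Nat} (hjK : j ≤ K)
    (hbad : 280 < jl (d.take (j+1))) : scanK d z K = scanK d z j := by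
  induction K with
  | zero => have : j = 0 := by omega
            subst this; rfl
  | succ K ih =>
    rcases Nat.lt_or_ge j (K+1) with h' | h'
    · have : ¬ jl (d.take (K+1)) ≤ 280 := by
        have := jl_take_mono d (show j+1 ≤ K+1 by omega)
        omega
      rw [scanK, if_neg this]
      exact ih (by omega)
    · have : j = K + 1 := by omega
      subst this; rfl

-- value of the scan at a point known to fit
lemma scanK_at (d : List String) (z : Bool) (j : Nat) (hfit : jl (d.take j) ≤ 280) :
    Option.map (fun k : Nat => (k : Int)) (scanK d z j)
      = (if j = 0 then (if z then some 0 else none) else some (j : Int)) := by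
  cases j with
  | zero => cases z <;> simp [scanK]
  | succ j => simp [scanK, if_pos hfit]

lemma scanK_le (d : List String) (z : Bool) : ∀ (N k : Nat), scanK d z N = some k → k ≤ N := by
  intro N
  induction N with
  | zero => intro k h
            cases z <;> simp [scanK] at h <;> omega
  | succ N ih =>
    intro k h
    rw [scanK] at h
    split_ifs at h with hf
    · simp at h; omega
    · exact le_trans (ih k h) (by omega)

lemma scanK_true_isSome (d : List String) : ∀ (N : Nat), (scanK d true N).isSome := by
  intro N
  induction N with
  | zero => simp [scanK]
  | succ N ih =>
    rw [scanK]
    split_ifs <;> simp [ih]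

lemma scanK_z_irrel (d : List String) (h1 : jl (d.take 1) ≤ 280) :
    ∀ (N : Nat), 1 ≤ N → scanK d true N = scanK d false N := by
  intro N
  induction N with
  | zero => omega
  | succ N ih =>
    intro _
    rw [scanK, scanK]
    by_cases hf : jl (d.take (N+1)) ≤ 280
    · rw [if_pos hf, if_pos hf]
    · rw [if_neg hf, if_neg hf]
      rcases Nat.eq_zero_or_pos N with h0 | h0
      · subst h0
        exfalso
        exact hf (by simpa using h1)
      · exact ih h0

-- ===== A-side characterization =====

lemma loopA_nonneg (l : List String) (a : Int) (ha : 0 ≤ a) :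
    ∀ (k fuel : Nat), k < fuel →
      getltLoopA a l fuel (a + (k : Int))
        = Option.map (fun k' : Nat => PySem.Str.join ". " ((l.drop a.toNat).take k')) (scanK (l.drop a.toNat) false k) := by
  intro k
  induction k with
  | zero =>
    intro fuel hf
    cases fuel with
    | zero => omega
    | succ f => simp [getltLoopA, scanK]
  | succ k ih =>
    intro fuel hf
    cases fuel with
    | zero => omega
    | succ f =>
      have hguard : a < a + ((k+1 : Nat) : Int) := by push_cast; omega
      have hslice : PySem.List.slice l (some a) (some (a + ((k+1 : Nat) : Int)))
          = (l.drop a.toNat).take (k+1) := by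
        rw [PySem.List.slice_toNat l ha (by push_cast; omega)]
        congr 1
        omega
      rw [getltLoopA, if_pos hguard]
      simp only [hslice, jl_join]
      by_cases hfit : jl ((l.drop a.toNat).take (k+1)) ≤ 280
      · rw [if_neg (by omega)]
        rw [scanK, if_pos hfit]
        rfl
      · rw [if_pos (by omega)]
        rw [scanK, if_neg hfit]
        have harg : a + ((k+1 : Nat) : Int) - 1 = a + (k : Int) := by push_cast; ring
        rw [harg]
        exact ih f (by omega)

lemma slice_clamp {α : Type} (xs : List α) (a : Int) (c : Nat) (hc : c ≤ xs.length) :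
    PySem.List.slice xs (some a) (some (c : Int))
      = (xs.drop (PySem.List.clampIdx xs.length a)).take (c - PySem.List.clampIdx xs.length a) := by
  have hcl : PySem.List.clampIdx xs.length (c : Int) = c := by
    unfold PySem.List.clampIdx
    rw [if_neg (by omega)]
    omega
  have hdef : PySem.List.slice xs (some a) (some (c : Int))
      = List.take (PySem.List.clampIdx xs.length (c : Int) - PySem.List.clampIdx xs.length a)
          (List.drop (PySem.List.clampIdx xs.length a) xs) := rfl
  rw [hdef, hcl]

lemma loopA_neg (l : List String) (a : Int) (ha : a < 0) :
    ∀ (c fuel : Nat), c < fuel → c ≤ l.length →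
      getltLoopA a l fuel (c : Int)
        = Option.map (fun k' : Nat => PySem.Str.join ". " ((l.drop (PySem.List.clampIdx l.length a)).take k')) (scanK (l.drop (PySem.List.clampIdx l.length a)) true (c - PySem.List.clampIdx l.length a)) := by
  intro c
  induction c with
  | zero =>
    intro fuel hf _
    cases fuel with
    | zero => omega
    | succ f =>
      have hguard : a < ((0 : Nat) : Int) := by push_cast; omega
      rw [getltLoopA, if_pos hguard]
      rw [slice_clamp l a 0 (by omega)]
      simp only [Nat.zero_sub, List.take_zero, jl_join]
      rw [if_neg (by rw [jl_nil]; omega)]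
      simp [scanK]
  | succ c ih =>
    intro fuel hf hcle
    cases fuel with
    | zero => omega
    | succ f =>
      set E := PySem.List.clampIdx l.length a with hE
      have hguard : a < ((c+1 : Nat) : Int) := by push_cast; omega
      rw [getltLoopA, if_pos hguard]
      rw [slice_clamp l a (c+1) hcle]
      rw [← hE]
      simp only [jl_join]
      by_cases hcE : c + 1 ≤ E
      · -- empty segment: fits, returns ""
        have h0 : c + 1 - E = 0 := by omega
        rw [h0]
        simp only [List.take_zero]
        rw [if_neg (by rw [jl_nil]; omega)]
        simp [scanK]
      · have hk : c + 1 - E = (c - E) + 1 := by omega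
        rw [hk]
        by_cases hfit : jl ((l.drop E).take ((c - E) + 1)) ≤ 280
        · rw [if_neg (by omega)]
          rw [scanK, if_pos hfit]
          rfl
        · rw [if_pos (by omega)]
          rw [scanK, if_neg hfit]
          have harg : ((c+1 : Nat) : Int) - 1 = (c : Int) := by push_cast; ring
          rw [harg]
          exact ih f (by omega) (by omega)

-- ===== B-side characterization =====

lemma loopB_eq (d : List String) :
    ∀ (m j : Nat), d.length - j = m → j ≤ d.length → jl (d.take j) ≤ 280 →
      getltLoopB (d.drop j) (if j = 0 then none else some (j : Int)) (jl (d.take j)) (j : Int)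
        = Option.map (fun k : Nat => (k : Int)) (scanK d false d.length) := by
  intro m
  induction m with
  | zero =>
    intro j hm hj hfit
    have hjl : j = d.length := by omega
    subst hjl
    rw [List.drop_of_length_le (le_refl _)]
    rw [getltLoopB]
    rw [scanK_at d false d.length hfit]
    simp
  | succ m ih =>
    intro j hm hj hfit
    have hjlt : j < d.length := by omega
    have hdrop : d.drop j = d[j] :: d.drop (j+1) := by
      rw [List.drop_eq_getElem_cons hjlt]
    have htake : d.take (j+1) = d.take j ++ [d[j]] := by
      rw [List.take_succ]; simp [List.getElem?_eq_getElem hjlt]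
    have hne : d ≠ [] := by
      intro h; subst h; simp at hjlt
    have htkz : d.take j = [] ↔ j = 0 := by
      constructor
      · intro h
        have := congrArg List.length h
        simp only [List.length_take, List.length_nil] at this
        omega
      · intro h; subst h; simp
    have hjl1 : jl (d.take (j+1)) = jl (d.take j) + PySem.Str.len d[j] + (if j = 0 then 0 else 2) := by
      rw [htake, jl_append_singleton]
      by_cases h0 : j = 0
      · rw [if_pos (htkz.mpr h0), if_pos h0]
      · rw [if_neg (fun h => h0 (htkz.mp h)), if_neg h0]
    rw [hdrop, getltLoopB]
    have hifeq : (if (1 : Int) < (j : Int) + 1 then (2 : Int) else 0) = (if j = 0 then 0 else 2) := by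
      by_cases h0 : j = 0
      · subst h0; norm_num
      · rw [if_pos (by omega : (1:Int) < (j:Int)+1), if_neg h0]
    simp only [hifeq]
    by_cases hbad : 280 < jl (d.take (j+1))
    · rw [if_pos (by rw [hjl1] at hbad; linarith)]
      rw [scanK_unwind d false hj hbad]
      rw [scanK_at d false j hfit]
      simp
    · rw [if_neg (by rw [hjl1] at hbad; intro h; exact hbad (by linarith))]
      have hj1 : (j : Int) + 1 = ((j+1 : Nat) : Int) := by push_cast; ring
      have := ih (j+1) (by omega) (by omega) (not_lt.mp hbad)
      rw [if_neg (by omega)] at this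
      have hsum : jl (d.take j) + PySem.Str.len d[j] + (if j = 0 then (0:Int) else 2) = jl (d.take (j+1)) := by
        rw [hjl1]
      rw [hj1, hsum]
      exact this

-- scanK with z = false returns none whenever even the first sentence is too long
lemma scanK_big_none (d : List String) (h1 : 280 < jl (d.take 1)) :
    ∀ (N : Nat), scanK d false N = none := by
  intro N
  induction N with
  | zero => simp [scanK]
  | succ N ih =>
    rw [scanK, if_neg (by have := jl_take_mono d (show 1 ≤ N+1 by omega); omega)]
    exact ih

-- B's whole function in terms of scanK over the dropped tail
lemma altB_eq (a : Int) (l : List String) :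
    get_longest_tweet_alt a l
      = Option.map (fun k : Nat => PySem.Str.join ". " ((l.drop (PySem.List.clampIdx l.length a)).take k))
          (scanK (l.drop (PySem.List.clampIdx l.length a)) false
            (l.drop (PySem.List.clampIdx l.length a)).length) := by
  unfold get_longest_tweet_alt
  set d := l.drop (PySem.List.clampIdx l.length a) with hd
  have htail : PySem.List.slice l (some a) none = d := PySem.List.slice_some_none l a
  rw [htail]
  show (match getltLoopB d none 0 0 with
        | none => none
        | some b => some (PySem.Str.join ". " (PySem.List.slice d none (some b))))
      = Option.map (fun k : Nat => PySem.Str.join ". " (d.take k)) (scanK d false d.length)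
  have hB := loopB_eq d d.length 0 (by omega) (by omega) (by rw [List.take_zero, jl_nil]; omega)
  simp only [List.drop_zero, List.take_zero, jl_nil, reduceIte, Nat.cast_zero] at hB
  rw [hB]
  cases hscan : scanK d false d.length with
  | none => rfl
  | some k =>
    have hk := scanK_le d false d.length k hscan
    simp only [Option.map_some]
    have hsl : PySem.List.slice d none (some ((k : Nat) : Int)) = d.take k :=
      PySem.List.slice_to_natCast d k
    rw [hsl]

-- E for a negative start is the clamped (length + a)
lemma clampIdx_neg (n : Nat) (a : Int) (ha : a < 0) :
    PySem.List.clampIdx n a = ((n : Int) + a).toNat := by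
  simp only [PySem.List.clampIdx, if_pos ha]
  split_ifs <;> omega

-- ===== VERDICT (by name: the statements are the Claim_ definitions above) =====
theorem get_longest_tweet_spec : Claim_unchanged_get_longest_tweet := by
  intro a l _dom hnD
  rw [altB_eq]
  by_cases h : (l.length : Int) ≤ a
  · -- index_start past the end: both sides are none
    have ha : (0 : Int) ≤ a := le_trans (Int.natCast_nonneg _) h
    have hE : PySem.List.clampIdx l.length a = l.length := by
      simp only [PySem.List.clampIdx]
      rw [if_neg (by omega)]
      omega
    unfold get_longest_tweet
    rw [getltLoopA, if_neg (by omega), hE, List.drop_length]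
    simp [scanK]
  · push_neg at h
    by_cases ha : 0 ≤ a
    · -- nonnegative start
      have hE : PySem.List.clampIdx l.length a = a.toNat := by
        simp only [PySem.List.clampIdx]
        rw [if_neg (by omega)]
        omega
      rw [hE]
      have hK : (l.length : Int) = a + (((((l.length : Int)) - a).toNat : Nat) : Int) := by omega
      have hA := loopA_nonneg l a ha (((l.length : Int) - a).toNat)
        ((((l.length : Int) - a).toNat) + 1) (by omega)
      rw [← hK] at hA
      unfold get_longest_tweet
      rw [hA]
      have hdlen : ((l.length : Int) - a).toNat = (l.drop a.toNat).length := by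
        rw [List.length_drop]; omega
      rw [hdlen]
    · -- negative start, outside D_
      push_neg at ha
      have haneg : a < 0 := ha
      have hE : PySem.List.clampIdx l.length a = ((l.length : Int) + a).toNat :=
        clampIdx_neg l.length a haneg
      set d := l.drop (PySem.List.clampIdx l.length a) with hd
      have hnD2 : ¬ (d = [] ∨ 280 < PySem.Str.len (d.headD "")) := by
        intro hcon
        exact hnD ⟨haneg, by rw [hd, hE] at hcon; exact hcon⟩
      push_neg at hnD2
      obtain ⟨hdne, hhead⟩ := hnD2
      have hfit1 : jl (d.take 1) ≤ 280 := by
        cases hdd : d with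
        | nil => exact absurd hdd hdne
        | cons s tl =>
          have hh : d.headD "" = s := by rw [hdd]; rfl
          simp only [List.take_succ_cons, List.take_zero, jl]
          rw [if_neg (by simp)]
          simp only [List.map_cons, List.map_nil, List.sum_cons, List.sum_nil, List.length_cons,
            List.length_nil]
          rw [hh] at hhead
          push_cast
          omega
      have hA := loopA_neg l a haneg l.length ((((l.length : Int) - a).toNat) + 1)
        (by omega) (le_refl _)
      unfold get_longest_tweet
      rw [hA]
      have hdlen : l.length - PySem.List.clampIdx l.length a = d.length := by
        rw [hd, List.length_drop]
      rw [hdlen]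
      have hd1 : 1 ≤ d.length := by
        cases hdd : d with
        | nil => exact absurd hdd hdne
        | cons s tl => simp [hdd]
      rw [← hd, scanK_z_irrel d hfit1 d.length hd1]

theorem get_longest_tweet_changed : Claim_changed_get_longest_tweet := by
  unfold Claim_changed_get_longest_tweet; decide

theorem get_longest_tweet_tight : Claim_exact_get_longest_tweet := by
  intro a l _dom hD
  obtain ⟨haneg, hcase⟩ := hD
  rw [altB_eq]
  have hE : PySem.List.clampIdx l.length a = ((l.length : Int) + a).toNat :=
    clampIdx_neg l.length a haneg
  set d := l.drop (PySem.List.clampIdx l.length a) with hd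
  have hcase2 : d = [] ∨ 280 < PySem.Str.len (d.headD "") := by
    rw [hd, hE]; exact hcase
  have hBnone : scanK d false d.length = none := by
    rcases hcase2 with hnil | hbig
    · rw [hnil]; simp [scanK]
    · cases hdd : d with
      | nil => simp [scanK]
      | cons s tl =>
        apply scanK_big_none
        simp only [List.take_succ_cons, List.take_zero, jl]
        rw [if_neg (by simp)]
        simp only [List.map_cons, List.map_nil, List.sum_cons, List.sum_nil, List.length_cons,
          List.length_nil]
        rw [hdd] at hbig
        have hh : (s :: tl).headD "" = s := rfl
        rw [hh] at hbig
        push_cast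
        omega
  have hA := loopA_neg l a haneg l.length ((((l.length : Int) - a).toNat) + 1)
    (by omega) (le_refl _)
  unfold get_longest_tweet
  rw [hA]
  have hdlen : l.length - PySem.List.clampIdx l.length a = d.length := by
    rw [hd, List.length_drop]
  rw [hdlen, ← hd, hBnone]
  have hS := scanK_true_isSome d d.length
  cases hs : scanK d true d.length with
  | none => rw [hs] at hS; simp at hS
  | some k => simp
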